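-- pv_equiv track=rewrite | github.com/luandnh/CodeLearnTraining.Python | maxNumberArray.py | max_number_array
-- ===== SOURCE A (Python) =====
-- def max_number_array(a):
--     a.sort()
--     check = False
--     maxFind = a[len(a) - 1] - 1
--     while check == False:
--         if a.count(maxFind) >= 1:
--             check = False
--             maxFind -= 1
--         else:
--             check = True
--     return maxFind
-- ===== SOURCE B (Python) =====
-- def max_number_array(a):
--     a.sort()
--     expected = a[-1] - 1
--     for v in reversed(a[:-1]):
--         if v == expected:
--             expected -= 1
--         elif v < expected:
--             break
--         # v > expected: duplicate of an already-seen value, skip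
--     return expected
-- ===== Notes on version B (the rewrite author's own statement) =====
-- stated objective: alternative
-- what changed: A decrements a candidate and rescans the whole list with a.count at every step; B sorts once and finds the gap with a single descending scan over the sorted elements, maintaining the next expected value.
import Mathlib
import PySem

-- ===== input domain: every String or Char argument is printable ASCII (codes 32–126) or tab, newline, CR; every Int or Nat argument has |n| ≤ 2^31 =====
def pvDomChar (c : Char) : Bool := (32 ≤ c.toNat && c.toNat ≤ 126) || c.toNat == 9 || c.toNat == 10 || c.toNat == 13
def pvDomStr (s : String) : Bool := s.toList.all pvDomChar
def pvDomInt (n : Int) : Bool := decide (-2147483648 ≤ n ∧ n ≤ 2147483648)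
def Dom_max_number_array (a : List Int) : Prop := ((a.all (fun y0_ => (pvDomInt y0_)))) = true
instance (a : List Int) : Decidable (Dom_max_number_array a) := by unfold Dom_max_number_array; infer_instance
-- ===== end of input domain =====

-- B replaces A's repeated a.count scans with one descending pass over the sorted list
-- (same in-place sort mutation as A; both raise IndexError on []).

-- ===== PORT A =====
-- termination fact for A's while loop (cited by countLoopA's decreasing_by)
theorem filterLe_pred_lt (l : List Int) (m : Int) (h : m ∈ l) :
    (l.filter (fun x => decide (x ≤ m - 1))).length <
      (l.filter (fun x => decide (x ≤ m))).length := by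
  have hsub : l.filter (fun x => decide (x ≤ m - 1)) =
      (l.filter (fun x => decide (x ≤ m))).filter (fun x => decide (x ≤ m - 1)) := by
    rw [List.filter_filter]
    apply List.filter_congr
    intro x _
    by_cases hx : x ≤ m - 1
    · have : x ≤ m := by omega
      simp [hx, this]
    · simp [hx]
  rw [hsub]
  apply List.length_filter_lt_length_iff_exists.mpr
  exact ⟨m, by simp [h], by simp⟩

-- A's while loop: decrement maxFind while a.count(maxFind) >= 1
def countLoopA (l : List Int) (m : Int) : Int :=
  if l.count m ≥ 1 then countLoopA l (m - 1) else m
termination_by (l.filter (fun x => decide (x ≤ m))).length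
decreasing_by
  exact filterLe_pred_lt l m (List.count_pos_iff.mp (by omega))

def max_number_array (a : List Int) : Int :=
  match PySem.List.pyGet? (PySem.List.sorted a (fun x => x) false)
      (((PySem.List.sorted a (fun x => x) false).length : Int) - 1) with
  | none => 0  -- IndexError on [], excluded by Pre_
  | some v => countLoopA (PySem.List.sorted a (fun x => x) false) (v - 1)

-- ===== PORT B =====
-- B's for loop over reversed(a[:-1]) with the expected-value countdown and break
def scanLoopB : List Int → Int → Int
  | [], e => e
  | v :: rest, e =>
      if v = e then scanLoopB rest (e - 1)
      else if v < e then e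
      else scanLoopB rest e

def max_number_array_alt (a : List Int) : Int :=
  match PySem.List.pyGet? (PySem.List.sorted a (fun x => x) false) (-1) with
  | none => 0  -- IndexError on [], excluded by Pre_
  | some mx => scanLoopB (PySem.List.sorted a (fun x => x) false).dropLast.reverse (mx - 1)

-- ===== PRECONDITION & SPEC =====
-- A raises IndexError on the empty list (a[len(a)-1]); B raises there too.
def Pre_max_number_array (a : List Int) : Prop := a ≠ []
instance (a : List Int) : Decidable (Pre_max_number_array a) := by unfold Pre_max_number_array; infer_instance
def pvWitness_max_number_array : List Int := [3, 1, 3, 2]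

def Spec_max_number_array (a : List Int) (out : Int) : Prop := out = max_number_array_alt a
instance (a : List Int) (out : Int) : Decidable (Spec_max_number_array a out) := by unfold Spec_max_number_array; infer_instance

-- ===== CLAIM (what is proved, stated in full; the proofs are below) =====
def Claim_equal_max_number_array : Prop := ∀ (a : List Int), Dom_max_number_array a → Pre_max_number_array a → Spec_max_number_array a (max_number_array a)

-- ===== LEMMAS AND PROOFS =====

-- countLoopA only looks at membership of values ≤ e
theorem countLoopA_congr (l1 l2 : List Int) :
    ∀ n e, (l1.filter (fun x => decide (x ≤ e))).length = n →
      (∀ x : Int, x ≤ e → (x ∈ l1 ↔ x ∈ l2)) →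
      countLoopA l1 e = countLoopA l2 e := by
  intro n
  induction n using Nat.strong_induction_on with
  | _ n ih =>
    intro e hn hmem
    conv_lhs => rw [countLoopA]
    conv_rhs => rw [countLoopA]
    by_cases h1 : e ∈ l1
    · have h2 : e ∈ l2 := (hmem e le_rfl).mp h1
      have c1 : l1.count e ≥ 1 := List.count_pos_iff.mpr h1
      have c2 : l2.count e ≥ 1 := List.count_pos_iff.mpr h2
      rw [if_pos c1, if_pos c2]
      exact ih _ (hn ▸ filterLe_pred_lt l1 e h1) (e - 1) rfl
        (fun x hx => hmem x (by omega))
    · have h2 : e ∉ l2 := fun h => h1 ((hmem e le_rfl).mpr h)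
      have c1 : ¬ l1.count e ≥ 1 := by
        simp [List.count_eq_zero_of_not_mem h1]
      have c2 : ¬ l2.count e ≥ 1 := by
        simp [List.count_eq_zero_of_not_mem h2]
      rw [if_neg c1, if_neg c2]

-- on a nonincreasing list the single scan equals the countdown loop
theorem scanLoopB_eq_countLoopA (r : List Int)
    (hr : r.Pairwise (fun a b => b ≤ a)) :
    ∀ e, scanLoopB r e = countLoopA r e := by
  induction r with
  | nil =>
    intro e
    rw [scanLoopB]
    conv_rhs => rw [countLoopA]

    simp
  | cons v rest ih =>
    intro e
    have hrest : rest.Pairwise (fun a b => b ≤ a) := hr.tail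
    have hle : ∀ x ∈ rest, x ≤ v := fun x hx => List.rel_of_pairwise_cons hr hx
    rw [scanLoopB]
    by_cases hv : v = e
    · subst hv
      conv_rhs => rw [countLoopA]
      have : (v :: rest).count v ≥ 1 := List.count_pos_iff.mpr (List.mem_cons_self)
      rw [if_pos rfl, if_pos this, ih hrest (v - 1)]
      exact (countLoopA_congr rest (v :: rest) _ (v - 1) rfl
        (fun x hx => by simp [List.mem_cons]; intro h; omega))
    · rw [if_neg hv]
      by_cases hlt : v < e
      · rw [if_pos hlt]
        conv_rhs => rw [countLoopA]
        have hne : e ∉ v :: rest := by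
          simp [List.mem_cons]
          constructor
          · omega
          · intro h; have := hle e h; omega
        rw [if_neg (by simp [List.count_eq_zero_of_not_mem hne])]
      · rw [if_neg hlt, ih hrest e]
        exact (countLoopA_congr rest (v :: rest) _ e rfl
          (fun x hx => by simp [List.mem_cons]; intro h; omega))

-- ===== VERDICT (by name: the statement is the Claim_ definition above) =====
theorem max_number_array_spec : Claim_equal_max_number_array := by
  intro a _ hpre
  unfold Spec_max_number_array max_number_array max_number_array_alt
  set s := PySem.List.sorted a (fun x => x) false with hs
  have hsne : s ≠ [] := by
    rw [hs, Ne, PySem.List.sorted_eq_nil_iff]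
    exact hpre
  have hlen : 1 ≤ s.length := List.length_pos_iff.mpr hsne
  have hlast : s.getLast? = some (s.getLast hsne) := List.getLast?_eq_some_getLast hsne
  have h1 : PySem.List.pyGet? s ((s.length : Int) - 1) = some (s.getLast hsne) := by
    rw [show ((s.length : Int) - 1) = ((s.length - 1 : Nat) : Int) by omega,
      PySem.List.pyGet?_natCast]
    rw [List.getElem?_eq_getElem (by omega)]
    rw [List.getLast_eq_getElem]
  have h2 : PySem.List.pyGet? s (-1) = some (s.getLast hsne) := by
    rw [PySem.List.pyGet?_neg_one, hlast]
  rw [h1, h2]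
  set mx := s.getLast hsne with hmx
  -- s = dropLast ++ [mx], and everything queried is ≤ mx - 1 < mx
  have hsplit : s.dropLast ++ [mx] = s := List.dropLast_append_getLast hsne
  have hpw : s.Pairwise (fun a b => a ≤ b) :=
    PySem.List.sorted_pairwise a (fun x => x)
  show countLoopA s (mx - 1) = scanLoopB s.dropLast.reverse (mx - 1)
  have hrpw : s.dropLast.reverse.Pairwise (fun a b => b ≤ a) := by
    rw [List.pairwise_reverse]
    exact hpw.sublist (List.dropLast_sublist s)
  rw [scanLoopB_eq_countLoopA _ hrpw]
  apply countLoopA_congr s s.dropLast.reverse _ (mx - 1) rfl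
  intro x hx
  rw [List.mem_reverse]
  constructor
  · intro hmem
    rw [← hsplit] at hmem
    rcases List.mem_append.mp hmem with h | h
    · exact h
    · simp at h; omega
  · intro hmem
    rw [← hsplit]
    exact List.mem_append.mpr (Or.inl hmem)
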